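-- pv_equiv track=rewrite | github.com/loic-crampon/advent-of-code-2024 | day-08/day-08-part-1.py | calc_antinodes
-- ===== SOURCE A (Python) =====
-- def calc_antinodes (antennas, width_map, height_map):
--     antinodes = []
--     for key, values in antennas.items():
--         if (len(values) > 1):
--             for point_a in range(len(values) - 1):
--                 for point_b in range(point_a + 1, len(values)):
--                     dist_x = values[point_a][0] - values[point_b][0]
--                     dist_y = values[point_a][1] - values[point_b][1]
--
--                     antiniode_a = (values[point_a][0] + dist_x, values[point_a][1] + dist_y)
--                     if (antiniode_a[0] >= 0) and (antiniode_a[0] < width_map) and (antiniode_a[1] >= 0) and (antiniode_a[1] < height_map):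
--                         if antiniode_a not in antinodes:
--                             antinodes.append(antiniode_a)
--
--                     antiniode_b = (values[point_b][0] - dist_x, values[point_b][1] - dist_y)
--                     if (antiniode_b[0] >= 0) and (antiniode_b[0] < width_map) and (antiniode_b[1] >= 0) and (antiniode_b[1] < height_map):
--                         if antiniode_b not in antinodes:
--                             antinodes.append(antiniode_b)
--     return antinodes
-- ===== SOURCE B (Python) =====
-- def calc_antinodes(antennas, width_map, height_map):
--     # Pass 1: build the flat candidate list, a then b per unordered pair,
--     # pairing each antenna with the tail of its list (no index arithmetic).
--     candidates = []
--     for values in antennas.values():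
--         tail = list(values)
--         while tail:
--             ax, ay = tail.pop(0)
--             for bx, by in tail:
--                 candidates.append((2 * ax - bx, 2 * ay - by))
--                 candidates.append((2 * bx - ax, 2 * by - ay))
--     # Pass 2: keep in-bounds candidates, first occurrence only (seen-set dedup).
--     antinodes = []
--     seen = set()
--     for x, y in candidates:
--         if 0 <= x < width_map and 0 <= y < height_map and (x, y) not in seen:
--             seen.add((x, y))
--             antinodes.append((x, y))
--     return antinodes
-- ===== Notes on version B (the rewrite author's own statement) =====
-- stated objective: alternative
-- what changed: B replaces A's fused nested index loops (bounds check and dedup inline) by a two-pass pipeline: first build a flat candidate list by structural tail pairing (pop/iterate, no index arithmetic), then one separate filter-dedup pass using a seen-set.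
import Mathlib
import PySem

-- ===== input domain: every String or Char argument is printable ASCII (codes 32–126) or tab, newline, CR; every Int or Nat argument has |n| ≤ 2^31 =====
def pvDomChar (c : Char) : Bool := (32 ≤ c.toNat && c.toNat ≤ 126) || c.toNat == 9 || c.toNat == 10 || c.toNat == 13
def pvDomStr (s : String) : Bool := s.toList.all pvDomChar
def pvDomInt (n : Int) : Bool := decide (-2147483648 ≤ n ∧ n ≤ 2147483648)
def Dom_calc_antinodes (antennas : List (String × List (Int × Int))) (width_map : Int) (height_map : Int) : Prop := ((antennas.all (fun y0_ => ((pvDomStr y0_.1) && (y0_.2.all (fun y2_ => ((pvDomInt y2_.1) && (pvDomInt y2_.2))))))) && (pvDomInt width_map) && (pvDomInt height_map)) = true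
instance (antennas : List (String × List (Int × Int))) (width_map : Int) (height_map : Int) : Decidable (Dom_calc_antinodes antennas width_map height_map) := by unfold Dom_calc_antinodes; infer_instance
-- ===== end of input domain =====

-- B builds one flat candidate list (structural tail pairing) and then filters/dedups it in a
-- separate seen-set pass, instead of A's fused nested index loops with a linear list scan.

-- ===== PORT A =====
def calc_antinodes (antennas : List (String × List (Int × Int))) (width_map : Int) (height_map : Int) : List (Int × Int) :=
  antennas.foldl (fun antinodes kv =>
    let values := kv.2
    if ((values.length : Int) > 1) then
      (PySem.List.pyRange 0 ((values.length : Int) - 1) 1).foldl (fun antinodes point_a =>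
        (PySem.List.pyRange (point_a + 1) (values.length : Int) 1).foldl (fun antinodes point_b =>
          let va := PySem.List.pyGetD values point_a (0, 0)
          let vb := PySem.List.pyGetD values point_b (0, 0)
          let dist_x := va.1 - vb.1
          let dist_y := va.2 - vb.2
          let antiniode_a := (va.1 + dist_x, va.2 + dist_y)
          let antinodes :=
            if antiniode_a.1 ≥ 0 ∧ antiniode_a.1 < width_map ∧ antiniode_a.2 ≥ 0 ∧ antiniode_a.2 < height_map then
              (if antiniode_a ∈ antinodes then antinodes else antinodes ++ [antiniode_a])
            else antinodes
          let antiniode_b := (vb.1 - dist_x, vb.2 - dist_y)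
          if antiniode_b.1 ≥ 0 ∧ antiniode_b.1 < width_map ∧ antiniode_b.2 ≥ 0 ∧ antiniode_b.2 < height_map then
            (if antiniode_b ∈ antinodes then antinodes else antinodes ++ [antiniode_b])
          else antinodes) antinodes) antinodes
    else antinodes) []

-- ===== PORT B =====
-- the 'while tail: ax, ay = tail.pop(0); for bx, by in tail: append both candidates' loop of Source B
def pvCandPairs : List (Int × Int) → List (Int × Int)
  | [] => []
  | a :: tail =>
      tail.flatMap (fun b =>
        [(2 * a.1 - b.1, 2 * a.2 - b.2), (2 * b.1 - a.1, 2 * b.2 - a.2)]) ++ pvCandPairs tail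

def calc_antinodes_alt (antennas : List (String × List (Int × Int))) (width_map : Int) (height_map : Int) : List (Int × Int) :=
  let candidates := antennas.foldl (fun cands kv => cands ++ pvCandPairs kv.2) []
  (candidates.foldl
    (fun (st : List (Int × Int) × PySem.Set (Int × Int)) c =>
      if 0 ≤ c.1 ∧ c.1 < width_map ∧ 0 ≤ c.2 ∧ c.2 < height_map ∧ ¬ c ∈ st.2 then
        (st.1 ++ [c], PySem.Set.add st.2 c)
      else st)
    ([], PySem.Set.ofList [])).1

-- ===== PRECONDITION & SPEC =====
def Spec_calc_antinodes (antennas : List (String × List (Int × Int))) (width_map : Int) (height_map : Int) (out : List (Int × Int)) : Prop := out = calc_antinodes_alt antennas width_map height_map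
instance (antennas : List (String × List (Int × Int))) (width_map : Int) (height_map : Int) (out : List (Int × Int)) : Decidable (Spec_calc_antinodes antennas width_map height_map out) := by unfold Spec_calc_antinodes; infer_instance

-- ===== CLAIM (what is proved, stated in full; the proofs are below) =====
def Claim_equal_calc_antinodes : Prop := ∀ (antennas : List (String × List (Int × Int))) (width_map : Int) (height_map : Int), Dom_calc_antinodes antennas width_map height_map → Spec_calc_antinodes antennas width_map height_map (calc_antinodes antennas width_map height_map)

-- ===== LEMMAS AND PROOFS =====

-- the common per-candidate step: keep if in bounds and not already kept
def pvStep (w h : Int) (acc : List (Int × Int)) (c : Int × Int) : List (Int × Int) :=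
  if 0 ≤ c.1 ∧ c.1 < w ∧ 0 ≤ c.2 ∧ c.2 < h then
    (if c ∈ acc then acc else acc ++ [c])
  else acc

-- the two candidates of one pair, in A's a-then-b order (= B's append order)
def pvPair (a b : Int × Int) : List (Int × Int) :=
  [(2 * a.1 - b.1, 2 * a.2 - b.2), (2 * b.1 - a.1, 2 * b.2 - a.2)]

-- A's innermost loop body, named (definitionally equal to the lambda in the port)
def pvInnerBody (w h : Int) (values : List (Int × Int)) (point_a : Int)
    (antinodes : List (Int × Int)) (point_b : Int) : List (Int × Int) :=
  let va := PySem.List.pyGetD values point_a (0, 0)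
  let vb := PySem.List.pyGetD values point_b (0, 0)
  let dist_x := va.1 - vb.1
  let dist_y := va.2 - vb.2
  let antiniode_a := (va.1 + dist_x, va.2 + dist_y)
  let antinodes :=
    if antiniode_a.1 ≥ 0 ∧ antiniode_a.1 < w ∧ antiniode_a.2 ≥ 0 ∧ antiniode_a.2 < h then
      (if antiniode_a ∈ antinodes then antinodes else antinodes ++ [antiniode_a])
    else antinodes
  let antiniode_b := (vb.1 - dist_x, vb.2 - dist_y)
  if antiniode_b.1 ≥ 0 ∧ antiniode_b.1 < w ∧ antiniode_b.2 ≥ 0 ∧ antiniode_b.2 < h then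
    (if antiniode_b ∈ antinodes then antinodes else antinodes ++ [antiniode_b])
  else antinodes

-- A's outer loop body over point_a (definitionally the port's outer lambda)
def pvOuterBody (w h : Int) (values : List (Int × Int))
    (antinodes : List (Int × Int)) (point_a : Int) : List (Int × Int) :=
  (PySem.List.pyRange (point_a + 1) ((values.length : Int)) 1).foldl
    (pvInnerBody w h values point_a) antinodes

theorem pv_foldl_flatMap {α β γ : Type} (l : List α) (g : α → List β) (f : γ → β → γ) (init : γ) :
    (l.flatMap g).foldl f init = l.foldl (fun acc x => (g x).foldl f acc) init := by
  induction l generalizing init with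
  | nil => rfl
  | cons x xs ih => simp [List.flatMap_cons, List.foldl_append, ih]

theorem pv_foldl_ext {α β : Type} (l : List α) (f g : β → α → β) (init : β)
    (h : ∀ acc x, f acc x = g acc x) : l.foldl f init = l.foldl g init := by
  induction l generalizing init with
  | nil => rfl
  | cons x xs ih => simp [List.foldl_cons, h, ih]

-- one pair's processing in A is two pvStep steps on its pvPair candidates
theorem pv_bodyA_eq (w h : Int) (va vb : Int × Int) (acc : List (Int × Int)) :
    (let dist_x := va.1 - vb.1
     let dist_y := va.2 - vb.2
     let antiniode_a := (va.1 + dist_x, va.2 + dist_y)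
     let acc' :=
       if antiniode_a.1 ≥ 0 ∧ antiniode_a.1 < w ∧ antiniode_a.2 ≥ 0 ∧ antiniode_a.2 < h then
         (if antiniode_a ∈ acc then acc else acc ++ [antiniode_a])
       else acc
     let antiniode_b := (vb.1 - dist_x, vb.2 - dist_y)
     if antiniode_b.1 ≥ 0 ∧ antiniode_b.1 < w ∧ antiniode_b.2 ≥ 0 ∧ antiniode_b.2 < h then
       (if antiniode_b ∈ acc' then acc' else acc' ++ [antiniode_b])
     else acc')
    = (pvPair va vb).foldl (pvStep w h) acc := by
  have h1 : va.1 + (va.1 - vb.1) = 2 * va.1 - vb.1 := by ring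
  have h2 : va.2 + (va.2 - vb.2) = 2 * va.2 - vb.2 := by ring
  have h3 : vb.1 - (va.1 - vb.1) = 2 * vb.1 - va.1 := by ring
  have h4 : vb.2 - (va.2 - vb.2) = 2 * vb.2 - va.2 := by ring
  simp only [pvPair, List.foldl_cons, List.foldl_nil, pvStep, ge_iff_le, h1, h2, h3, h4]

-- A's inner loop from index i is the pvStep fold over the candidates of values[i:]
theorem pv_inner (w h : Int) (values : List (Int × Int)) (pa i : Int) (hi : 0 ≤ i)
    (acc : List (Int × Int)) :
    (PySem.List.pyRange i ((values.length : Int)) 1).foldl (pvInnerBody w h values pa) acc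
    = ((values.drop i.toNat).flatMap (pvPair (PySem.List.pyGetD values pa (0, 0)))).foldl
        (pvStep w h) acc := by
  rw [pv_foldl_flatMap]
  refine Eq.trans
    (PySem.List.foldl_pyRange_pyGetD' values ((0 : Int), (0 : Int))
      (fun antinodes vb =>
        let va := PySem.List.pyGetD values pa (0, 0)
        let dist_x := va.1 - vb.1
        let dist_y := va.2 - vb.2
        let antiniode_a := (va.1 + dist_x, va.2 + dist_y)
        let antinodes :=
          if antiniode_a.1 ≥ 0 ∧ antiniode_a.1 < w ∧ antiniode_a.2 ≥ 0 ∧ antiniode_a.2 < h then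
            (if antiniode_a ∈ antinodes then antinodes else antinodes ++ [antiniode_a])
          else antinodes
        let antiniode_b := (vb.1 - dist_x, vb.2 - dist_y)
        if antiniode_b.1 ≥ 0 ∧ antiniode_b.1 < w ∧ antiniode_b.2 ≥ 0 ∧ antiniode_b.2 < h then
          (if antiniode_b ∈ antinodes then antinodes else antinodes ++ [antiniode_b])
        else antinodes)
      acc hi) ?_
  exact pv_foldl_ext _ _ _ _ (fun acc' vb => pv_bodyA_eq w h _ vb acc')

theorem pv_candPairs_short (values : List (Int × Int)) (hlen : values.length ≤ 1) :
    pvCandPairs values = [] := by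
  match values, hlen with
  | [], _ => rfl
  | [a], _ => rfl
  | a :: b :: t, hlen => simp at hlen

-- per-values: A's indexed double loop = pvStep fold over pvCandPairs
theorem pv_innerA_eq (w h : Int) (values : List (Int × Int)) (acc : List (Int × Int)) :
    (PySem.List.pyRange 0 ((values.length : Int) - 1) 1).foldl (pvOuterBody w h values) acc
    = (pvCandPairs values).foldl (pvStep w h) acc := by
  induction values generalizing acc with
  | nil => rw [PySem.List.pyRange_one_eq_nil (by simp)]; rfl
  | cons v vs ih =>
    by_cases hvs : vs = []
    · subst hvs
      rw [PySem.List.pyRange_one_eq_nil (by simp)]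
      rfl
    · have hpos : 0 < vs.length := List.length_pos_iff.mpr hvs
      have h01 : (0 : Int) < ((v :: vs).length : Int) - 1 := by
        simp only [List.length_cons]; push_cast; omega
      rw [PySem.List.pyRange_one_cons h01, List.foldl_cons]
      -- first element: point_a = 0 pairs v with every element of vs
      have h0 : pvOuterBody w h (v :: vs) acc 0
          = (vs.flatMap (pvPair v)).foldl (pvStep w h) acc := by
        refine Eq.trans (pv_inner w h (v :: vs) 0 (0 + 1) (by omega) acc) ?_
        norm_num [PySem.List.pyGetD_zero_cons]
      -- the remaining outer iterations on (v :: vs) are the whole loop on vs, shifted by one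
      have hshift : ∀ acc' : List (Int × Int),
          (PySem.List.pyRange 1 (((v :: vs).length : Int) - 1) 1).foldl
            (pvOuterBody w h (v :: vs)) acc'
          = (PySem.List.pyRange 0 ((vs.length : Int) - 1) 1).foldl
            (pvOuterBody w h vs) acc' := by
        intro acc'
        have e1 : ((v :: vs).length : Int) - 1 = (vs.length : Int) := by
          push_cast [List.length_cons]; ring
        rw [e1, PySem.List.pyRange_one 1 ((vs.length : Int)),
            PySem.List.pyRange_one 0 ((vs.length : Int) - 1), List.foldl_map, List.foldl_map]
        have e2 : ((vs.length : Int) - 1).toNat = ((vs.length : Int) - 1 - 0).toNat := by omega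
        rw [← e2]
        refine pv_foldl_ext _ _ _ _ (fun acc'' k => ?_)
        refine Eq.trans (pv_inner w h (v :: vs) (1 + (k : Int)) (1 + (k : Int) + 1) (by omega) acc'') ?_
        refine Eq.trans ?_ (pv_inner w h vs ((0 : Int) + (k : Int)) ((0 : Int) + (k : Int) + 1) (by omega) acc'').symm
        have hva : PySem.List.pyGetD (v :: vs) (1 + (k : Int)) ((0 : Int), (0 : Int))
            = PySem.List.pyGetD vs ((0 : Int) + (k : Int)) ((0 : Int), (0 : Int)) := by
          have c1 : (1 + (k : Int)) = (((k + 1 : Nat)) : Int) := by push_cast; ring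
          have c2 : ((0 : Int) + (k : Int)) = ((k : Nat) : Int) := by ring
          rw [c1, c2, PySem.List.pyGetD_natCast, PySem.List.pyGetD_natCast, List.getD_cons_succ]
        have hdrop : (v :: vs).drop ((1 + (k : Int) + 1).toNat)
            = vs.drop (((0 : Int) + (k : Int) + 1).toNat) := by
          have c1 : (1 + (k : Int) + 1).toNat = k + 2 := by omega
          have c2 : ((0 : Int) + (k : Int) + 1).toNat = k + 1 := by omega
          rw [c1, c2, List.drop_succ_cons]
        rw [hva, hdrop]
      have hfinal : (pvCandPairs vs).foldl (pvStep w h)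
            ((vs.flatMap (pvPair v)).foldl (pvStep w h) acc)
          = (pvCandPairs (v :: vs)).foldl (pvStep w h) acc := by
        simp only [pvCandPairs, List.foldl_append]
        rfl
      calc (PySem.List.pyRange 1 (((v :: vs).length : Int) - 1) 1).foldl
            (pvOuterBody w h (v :: vs)) (pvOuterBody w h (v :: vs) acc 0)
          = (PySem.List.pyRange 0 ((vs.length : Int) - 1) 1).foldl (pvOuterBody w h vs)
              ((vs.flatMap (pvPair v)).foldl (pvStep w h) acc) := by rw [h0]; exact hshift _
        _ = (pvCandPairs vs).foldl (pvStep w h)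
              ((vs.flatMap (pvPair v)).foldl (pvStep w h) acc) := ih _
        _ = (pvCandPairs (v :: vs)).foldl (pvStep w h) acc := hfinal

-- the whole A loop over antennas, with generalized accumulator
theorem pv_A_eq (w h : Int) (l : List (String × List (Int × Int))) (acc : List (Int × Int)) :
    l.foldl (fun antinodes kv =>
        if ((kv.2.length : Int) > 1) then
          (PySem.List.pyRange 0 ((kv.2.length : Int) - 1) 1).foldl (pvOuterBody w h kv.2) antinodes
        else antinodes) acc
    = l.foldl (fun acc kv => (pvCandPairs kv.2).foldl (pvStep w h) acc) acc := by
  induction l generalizing acc with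
  | nil => rfl
  | cons kv l ih =>
    rw [List.foldl_cons, List.foldl_cons, ih]
    congr 1
    split_ifs with hlen
    · exact pv_innerA_eq w h kv.2 acc
    · rw [pv_candPairs_short kv.2 (by exact_mod_cast not_lt.mp hlen), List.foldl_nil]

-- the seen-set filter pass computes the pvStep fold, given seen ↔ kept
theorem pv_filter_pass (w h : Int) (l : List (Int × Int)) (out : List (Int × Int))
    (seen : PySem.Set (Int × Int)) (hinv : ∀ x, x ∈ seen ↔ x ∈ out) :
    (l.foldl
      (fun (st : List (Int × Int) × PySem.Set (Int × Int)) c =>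
        if 0 ≤ c.1 ∧ c.1 < w ∧ 0 ≤ c.2 ∧ c.2 < h ∧ ¬ c ∈ st.2 then
          (st.1 ++ [c], PySem.Set.add st.2 c)
        else st)
      (out, seen)).1 = l.foldl (pvStep w h) out := by
  induction l generalizing out seen with
  | nil => rfl
  | cons c l ih =>
    simp only [List.foldl_cons]
    by_cases hb : 0 ≤ c.1 ∧ c.1 < w ∧ 0 ≤ c.2 ∧ c.2 < h
    · by_cases hm : c ∈ out
      · rw [if_neg (by simp [hinv, hm]), ih out seen hinv]
        simp [pvStep, hb, hm]
      · rw [if_pos (by simp [hb, (hinv c).not, hm])]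
        rw [ih (out ++ [c]) (PySem.Set.add seen c)
          (by intro x; simp [PySem.Set.mem_add, hinv x, or_comm])]
        simp [pvStep, hb, hm]
    · rw [if_neg (by tauto), ih out seen hinv]
      simp only [pvStep]
      rw [if_neg (by tauto)]

-- ===== VERDICT (by name: the statement is the Claim_ definition above) =====
theorem calc_antinodes_spec : Claim_equal_calc_antinodes := by
  intro antennas w h _
  unfold Spec_calc_antinodes calc_antinodes calc_antinodes_alt
  rw [PySem.List.foldl_append_eq_flatMap, List.nil_append,
      pv_filter_pass w h _ [] (PySem.Set.ofList []) (by intro x; simp [PySem.Set.ofList]),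
      pv_foldl_flatMap]
  exact pv_A_eq w h antennas []
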